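-- pv_equiv track=rewrite | github.com/Leigh-Dela-Cruz/Kubli | app/src/main/python/zerowidth.py | embed_bits
-- ===== SOURCE A (Python) =====
-- ZERO = '\u200b'  # Zero-width space (bit 0)
--
-- ONE = '\u200c'   # Zero-width non-joiner (bit 1)
--
-- def embed_bits(cover_text: str, bitstream: str) -> str:
--     """
--     Embeds bitstream into cover text using zero-width characters.
--
--     Args:
--         cover_text: Normal readable text
--         bitstream: Binary string or list of bits
--
--     Returns:
--         Steganographic text with hidden data
--     """
--     # Convert list to string if needed
--     if isinstance(bitstream, list):
--         bitstream = ''.join(str(b) for b in bitstream)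
--
--     result = []
--     bit_index = 0
--
--     for char in cover_text:
--         result.append(char)
--
--         # Inject after spaces or punctuation
--         if char in (' ', '.', ',', '!', '?', ';', ':'):
--             if bit_index < len(bitstream):
--                 bit = bitstream[bit_index]
--                 result.append(ONE if bit == '1' else ZERO)
--                 bit_index += 1
--
--     # Append remaining bits at end
--     while bit_index < len(bitstream):
--         bit = bitstream[bit_index]
--         result.append(ONE if bit == '1' else ZERO)
--         bit_index += 1
--
--     return ''.join(result)
-- ===== SOURCE B (Python) =====
-- ZERO = '\u200b'  # Zero-width space (bit 0)
-- ONE = '\u200c'   # Zero-width non-joiner (bit 1)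
--
-- def embed_bits(cover_text: str, bitstream: str) -> str:
--     # Convert list to string if needed
--     if isinstance(bitstream, list):
--         bitstream = ''.join(str(b) for b in bitstream)
--     # Phase 1: collect the injection positions (indices of spaces/punctuation).
--     positions = [i for i, c in enumerate(cover_text) if c in ' .,!?;:']
--     # Phase 2: assemble from slices of cover_text, one slice per consumed bit.
--     k = min(len(positions), len(bitstream))
--     parts = []
--     prev = 0
--     for j in range(k):
--         p = positions[j]
--         parts.append(cover_text[prev:p + 1])
--         parts.append(ONE if bitstream[j] == '1' else ZERO)
--         prev = p + 1
--     parts.append(cover_text[prev:])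
--     parts.append(''.join(ONE if c == '1' else ZERO for c in bitstream[k:]))
--     return ''.join(parts)
-- ===== Notes on version B (the rewrite author's own statement) =====
-- stated objective: faster
-- what changed: B replaces A's char-by-char walk that threads a bit_index and a trailing while loop with a two-phase index algorithm: it first collects all injection positions via enumerate, then assembles the output from whole slices of cover_text interleaved with the mapped bits, plus one final slice of cover_text and one slice of leftover bits.
import Mathlib
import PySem

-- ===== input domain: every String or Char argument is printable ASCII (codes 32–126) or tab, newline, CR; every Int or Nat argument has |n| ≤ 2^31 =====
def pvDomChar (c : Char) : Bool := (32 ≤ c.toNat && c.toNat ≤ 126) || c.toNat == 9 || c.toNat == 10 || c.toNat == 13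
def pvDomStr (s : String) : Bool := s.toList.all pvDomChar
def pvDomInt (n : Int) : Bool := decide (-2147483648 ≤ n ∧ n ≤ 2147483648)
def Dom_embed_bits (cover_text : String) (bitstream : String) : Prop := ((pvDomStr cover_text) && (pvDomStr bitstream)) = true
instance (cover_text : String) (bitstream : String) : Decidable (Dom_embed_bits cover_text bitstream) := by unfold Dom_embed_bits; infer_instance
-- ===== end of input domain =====

-- B collects the delimiter positions first and then assembles the output from slices of the
-- cover text interleaved with the mapped bits; same return value as A (measured faster in a timing run).
-- ===== PORT A =====
def pvZERO : Char := Char.ofNat 0x200b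
def pvONE : Char := Char.ofNat 0x200c

def pvDelim (c : Char) : Bool :=
  c == ' ' || c == '.' || c == ',' || c == '!' || c == '?' || c == ';' || c == ':'

-- literal port of A's trailing `while` loop over the remaining bits
def pvTailLoop : List Char → List Char
  | [] => []
  | b :: rest => (if b == '1' then pvONE else pvZERO) :: pvTailLoop rest

def embed_bits (cover_text : String) (bitstream : String) : String :=
  let bs := bitstream.toList
  let st := cover_text.toList.foldl
    (fun (st : List Char × Nat) c =>
      let result := st.1 ++ [c]
      if pvDelim c then
        if st.2 < bs.length then
          (result ++ [if bs.getD st.2 ' ' == '1' then pvONE else pvZERO], st.2 + 1)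
        else (result, st.2)
      else (result, st.2))
    ([], 0)
  String.ofList (st.1 ++ pvTailLoop (bs.drop st.2))

-- ===== PORT B =====
def pvEnc (c : Char) : Char := if c == '1' then pvONE else pvZERO

-- [i for i, c in enumerate(...) if c in ' .,!?;:'] starting at index s
def pvPos (cl : List Char) (s : Int) : List Int :=
  (PySem.List.enumerate cl s).filterMap (fun ic => if pvDelim ic.2 then some ic.1 else none)

def embed_bits_alt (cover_text : String) (bitstream : String) : String :=
  let cl := cover_text.toList
  let bl := bitstream.toList
  let positions : List Int := pvPos cl 0
  let k : Nat := min positions.length bl.length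
  let st := (List.range k).foldl
    (fun (st : List Char × Int) j =>
      let p := positions.getD j 0
      (st.1 ++ PySem.List.slice cl (some st.2) (some (p + 1)) ++ [pvEnc (bl.getD j ' ')], p + 1))
    ([], 0)
  String.ofList (st.1 ++ PySem.List.slice cl (some st.2) none ++ (bl.drop k).map pvEnc)

-- ===== PRECONDITION & SPEC =====
def Spec_embed_bits (cover_text : String) (bitstream : String) (out : String) : Prop := out = embed_bits_alt cover_text bitstream
instance (cover_text : String) (bitstream : String) (out : String) : Decidable (Spec_embed_bits cover_text bitstream out) := by unfold Spec_embed_bits; infer_instance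

-- ===== CLAIM (what is proved, stated in full; the proofs are below) =====
def Claim_equal_embed_bits : Prop := ∀ (cover_text : String) (bitstream : String), Dom_embed_bits cover_text bitstream → Spec_embed_bits cover_text bitstream (embed_bits cover_text bitstream)

-- ===== LEMMAS AND PROOFS =====

-- common recursive characterisation of the interleaving both programs compute
def pvSpec : List Char → List Char → List Char
  | [], bs => bs.map pvEnc
  | c :: cs, bs =>
    if pvDelim c then
      match bs with
      | [] => c :: pvSpec cs []
      | b :: bt => c :: pvEnc b :: pvSpec cs bt
    else c :: pvSpec cs bs

-- B's loop body in zip form (used only by the proofs)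
def pvStep (full : List Char) (st : List Char × Int) (pb : Int × Char) : List Char × Int :=
  (st.1 ++ PySem.List.slice full (some st.2) (some (pb.1 + 1)) ++ [pvEnc pb.2], pb.1 + 1)

theorem pvSpec_nil_bits (cs : List Char) : pvSpec cs [] = cs := by
  induction cs with
  | nil => rfl
  | cons c cs ih => by_cases h : pvDelim c <;> simp [pvSpec, h, ih]

theorem pvTailLoop_eq_map (l : List Char) : pvTailLoop l = l.map pvEnc := by
  induction l with
  | nil => rfl
  | cons b rest ih => simp [pvTailLoop, pvEnc, ih]

-- A's fold produces pvSpec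
theorem pvA_go (bs : List Char) (cl : List Char) : ∀ (acc : List Char) (i : Nat),
    (cl.foldl
      (fun (st : List Char × Nat) c =>
        let result := st.1 ++ [c]
        if pvDelim c then
          if st.2 < bs.length then
            (result ++ [if bs.getD st.2 ' ' == '1' then pvONE else pvZERO], st.2 + 1)
          else (result, st.2)
        else (result, st.2)) (acc, i)).1
      ++ (bs.drop (cl.foldl
      (fun (st : List Char × Nat) c =>
        let result := st.1 ++ [c]
        if pvDelim c then
          if st.2 < bs.length then
            (result ++ [if bs.getD st.2 ' ' == '1' then pvONE else pvZERO], st.2 + 1)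
          else (result, st.2)
        else (result, st.2)) (acc, i)).2).map pvEnc
    = acc ++ pvSpec cl (bs.drop i) := by
  induction cl with
  | nil => intro acc i; simp [pvSpec]
  | cons c cs ih =>
    intro acc i
    by_cases hd : pvDelim c
    · by_cases hi : i < bs.length
      · have hdrop : bs.drop i = bs[i] :: bs.drop (i + 1) := List.drop_eq_getElem_cons hi
        simp only [List.foldl_cons, hd, hi, if_pos, ih]
        rw [hdrop]
        simp [pvSpec, hd, pvEnc, List.getD_eq_getElem?_getD, List.getElem?_eq_getElem hi]
      · have hdrop : bs.drop i = [] := List.drop_eq_nil_of_le (by omega)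
        simp only [List.foldl_cons, hd, hi, if_true, ih, hdrop]
        simp [pvSpec, hd]
        rw [hdrop, pvSpec_nil_bits]
    · simp only [List.foldl_cons, hd, ih]
      simp [pvSpec, hd]

-- reindexing: a fold over range (min |ps| |bs|) reading ps[j], bs[j] is a fold over ps.zip bs
theorem pv_fold_range_zip {α β γ : Type} (F : γ → α → β → γ) (da : α) (db : β) :
    ∀ (ps : List α) (bs : List β) (init : γ),
    (List.range (min ps.length bs.length)).foldl
      (fun st j => F st (ps.getD j da) (bs.getD j db)) init
    = (ps.zip bs).foldl (fun st pb => F st pb.1 pb.2) init := by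
  intro ps
  induction ps with
  | nil => intro bs init; simp
  | cons p pt ih =>
    intro bs init
    cases bs with
    | nil => simp
    | cons b bt =>
      have hmin : min (p :: pt).length (b :: bt).length = min pt.length bt.length + 1 := by
        simp [Nat.succ_min_succ]
      rw [hmin, List.range_succ_eq_map, List.foldl_cons, List.foldl_map]
      simpa using ih bt (F init p b)

-- B's range loop in zip form
theorem pvB_fold_eq (cl bl : List Char) (ps : List Int) (init : List Char × Int) :
    (List.range (min ps.length bl.length)).foldl
      (fun (st : List Char × Int) j =>
        let p := ps.getD j 0
        (st.1 ++ PySem.List.slice cl (some st.2) (some (p + 1)) ++ [pvEnc (bl.getD j ' ')], p + 1))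
      init
    = (ps.zip bl).foldl (pvStep cl) init := by
  have h := pv_fold_range_zip (fun st p b => pvStep cl st (p, b)) (0 : Int) (' ' : Char) ps bl init
  rw [show (pvStep cl) = (fun (st : List Char × Int) (pb : Int × Char) => pvStep cl st (pb.1, pb.2)) by
    funext st pb; rfl]
  simpa [pvStep] using h

-- the head of pvPos on a cons
theorem pvPos_cons (c : Char) (cs : List Char) (s : Int) :
    pvPos (c :: cs) s = if pvDelim c then s :: pvPos cs (s + 1) else pvPos cs (s + 1) := by
  by_cases hd : pvDelim c <;> simp [pvPos, PySem.List.enumerate_cons, hd]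

-- B's slice assembly produces pvSpec (generalised over a consumed prefix `pre` and resume point `r`)
theorem pvB_go (cl : List Char) : ∀ (pre bl acc : List Char) (r : Nat), r ≤ pre.length →
    (((pvPos cl (pre.length : Int)).zip bl).foldl (pvStep (pre ++ cl)) (acc, (r : Int))).1
      ++ PySem.List.slice (pre ++ cl)
          (some ((((pvPos cl (pre.length : Int)).zip bl).foldl (pvStep (pre ++ cl)) (acc, (r : Int))).2)) none
      ++ (bl.drop (min (pvPos cl (pre.length : Int)).length bl.length)).map pvEnc
    = acc ++ pre.drop r ++ pvSpec cl bl := by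
  induction cl with
  | nil =>
    intro pre bl acc r hr
    simp [pvPos, PySem.List.enumerate_nil, PySem.List.slice_from_natCast, pvSpec]
  | cons c cs ih =>
    intro pre bl acc r hr
    rw [pvPos_cons]
    by_cases hd : pvDelim c
    · cases bl with
      | nil =>
        rw [if_pos hd]
        simp only [List.zip_nil_right, List.foldl_nil, List.length_nil,
          Nat.min_zero, List.drop_nil, List.map_nil, List.append_nil]
        rw [PySem.List.slice_from_natCast, List.drop_append_of_le_length hr]
        simp [pvSpec, hd, pvSpec_nil_bits]
      | cons b bt =>
        rw [if_pos hd]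
        simp only [List.zip_cons_cons, List.foldl_cons, List.length_cons,
          Nat.succ_min_succ, List.drop_succ_cons]
        have hslice : PySem.List.slice (pre ++ c :: cs) (some (r : Int)) (some ((pre.length : Int) + 1))
            = pre.drop r ++ [c] := by
          rw [show ((pre.length : Int) + 1) = (((pre.length + 1 : Nat)) : Int) by push_cast; ring,
            PySem.List.slice_natCast, List.drop_append_of_le_length hr]
          have h : pre.length + 1 - r = (pre.drop r).length + 1 := by simp; omega
          rw [h, show (c :: cs) = [c] ++ cs by rfl, ← List.append_assoc, List.take_append]
          simp
        have hstep : pvStep (pre ++ c :: cs) (acc, (r : Int)) ((pre.length : Int), b)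
            = (acc ++ (pre.drop r ++ [c]) ++ [pvEnc b], (pre.length : Int) + 1) := by
          simp [pvStep, hslice]
        rw [hstep]
        have := ih (pre ++ [c]) bt (acc ++ (pre.drop r ++ [c]) ++ [pvEnc b]) ((pre ++ [c]).length)
          (le_refl _)
        rw [show ((pre ++ [c]).length : Int) = (pre.length : Int) + 1 by simp,
          show (pre ++ [c]) ++ cs = pre ++ c :: cs by simp,
          show (pre ++ [c]).drop (pre ++ [c]).length = [] by simp] at this
        rw [this]
        simp [pvSpec, hd]
    · rw [if_neg hd]
      have := ih (pre ++ [c]) bl acc r (by simp; omega)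
      rw [show ((pre ++ [c]).length : Int) = (pre.length : Int) + 1 by simp,
        show (pre ++ [c]) ++ cs = pre ++ c :: cs by simp,
        List.drop_append_of_le_length hr] at this
      rw [this]
      simp [pvSpec, hd]

-- ===== VERDICT (by name: the statement is the Claim_ definition above) =====
theorem embed_bits_spec : Claim_equal_embed_bits := by
  intro cover_text bitstream _
  unfold Spec_embed_bits
  simp only [embed_bits, embed_bits_alt, pvB_fold_eq, pvTailLoop_eq_map]
  have hB := pvB_go cover_text.toList [] bitstream.toList [] 0 (le_refl _)
  simp only [List.length_nil, Nat.cast_zero, List.nil_append, List.drop_zero] at hB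
  rw [hB]
  have hA := pvA_go bitstream.toList cover_text.toList [] 0
  simp only [List.drop_zero, List.nil_append] at hA
  rw [hA]
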